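-- pv_equiv track=rewrite | github.com/Fliegenbart/ViralFlux-Media-Intelligence | backend/app/services/ml/models/geo_hierarchy.py | _align_cluster_labels
-- ===== SOURCE A (Python) =====
-- def _align_cluster_labels(
--     current_assignments: dict[str, str],
--     previous_assignments: dict[str, str],
-- ) -> dict[str, str]:
--     if not current_assignments or not previous_assignments:
--         return {str(state): str(cluster) for state, cluster in current_assignments.items()}
--
--     current_members: dict[str, set[str]] = {}
--     previous_members: dict[str, set[str]] = {}
--     for state, cluster_id in current_assignments.items():
--         current_members.setdefault(str(cluster_id), set()).add(str(state))
--     for state, cluster_id in previous_assignments.items():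
--         previous_members.setdefault(str(cluster_id), set()).add(str(state))
--
--     cluster_scores: list[tuple[int, str, str]] = []
--     for current_cluster, current_states in current_members.items():
--         for previous_cluster, previous_states in previous_members.items():
--             overlap = len(current_states & previous_states)
--             if overlap > 0:
--                 cluster_scores.append((overlap, current_cluster, previous_cluster))
--
--     remap: dict[str, str] = {}
--     used_current: set[str] = set()
--     used_previous: set[str] = set()
--     for _overlap, current_cluster, previous_cluster in sorted(cluster_scores, reverse=True):
--         if current_cluster in used_current or previous_cluster in used_previous:
--             continue
--         remap[current_cluster] = previous_cluster
--         used_current.add(current_cluster)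
--         used_previous.add(previous_cluster)
--
--     next_cluster_idx = 0
--     taken_labels = set(previous_members)
--     for current_cluster in sorted(current_members):
--         if current_cluster in remap:
--             continue
--         while f"cluster_{next_cluster_idx}" in taken_labels:
--             next_cluster_idx += 1
--         new_label = f"cluster_{next_cluster_idx}"
--         remap[current_cluster] = new_label
--         taken_labels.add(new_label)
--
--     return {
--         str(state): str(remap.get(cluster_id, cluster_id))
--         for state, cluster_id in current_assignments.items()
--     }
-- ===== SOURCE B (Python) =====
-- def _align_cluster_labels(
--     current_assignments: dict[str, str],
--     previous_assignments: dict[str, str],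
-- ) -> dict[str, str]:
--     if not current_assignments or not previous_assignments:
--         return {str(state): str(cluster) for state, cluster in current_assignments.items()}
--
--     current = {str(state): str(cluster) for state, cluster in current_assignments.items()}
--     previous = {str(state): str(cluster) for state, cluster in previous_assignments.items()}
--
--     # One pass over the states: count how many states each (current, previous)
--     # cluster pair shares, instead of intersecting member sets pairwise.
--     pair_overlap: dict[tuple[str, str], int] = {}
--     for state, cur_cluster in current.items():
--         prev_cluster = previous.get(state)
--         if prev_cluster is not None:
--             key = (cur_cluster, prev_cluster)
--             pair_overlap[key] = pair_overlap.get(key, 0) + 1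
--
--     scores = [(overlap, cur_c, prev_c) for (cur_c, prev_c), overlap in pair_overlap.items()]
--
--     remap: dict[str, str] = {}
--     used_previous: set[str] = set()
--     for _overlap, cur_c, prev_c in sorted(scores, reverse=True):
--         if cur_c in remap or prev_c in used_previous:
--             continue
--         remap[cur_c] = prev_c
--         used_previous.add(prev_c)
--
--     taken_labels = set(previous.values())
--     next_idx = 0
--     for cur_c in sorted(dict.fromkeys(current.values())):
--         if cur_c in remap:
--             continue
--         while f"cluster_{next_idx}" in taken_labels:
--             next_idx += 1
--         remap[cur_c] = f"cluster_{next_idx}"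
--         taken_labels.add(f"cluster_{next_idx}")
--
--     return {state: remap.get(cluster, cluster) for state, cluster in current.items()}
-- ===== Notes on version B (the rewrite author's own statement) =====
-- stated objective: faster
-- what changed: A intersects every current member set with every previous member set (|C1|*|C2| set intersections); B makes a single pass over the states, counting (current_cluster, previous_cluster) pair overlaps in a dict via a previous-assignment lookup, then sorts the (far fewer) counted pairs; the greedy matching and fresh-label phases are unchanged.
import Mathlib
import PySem

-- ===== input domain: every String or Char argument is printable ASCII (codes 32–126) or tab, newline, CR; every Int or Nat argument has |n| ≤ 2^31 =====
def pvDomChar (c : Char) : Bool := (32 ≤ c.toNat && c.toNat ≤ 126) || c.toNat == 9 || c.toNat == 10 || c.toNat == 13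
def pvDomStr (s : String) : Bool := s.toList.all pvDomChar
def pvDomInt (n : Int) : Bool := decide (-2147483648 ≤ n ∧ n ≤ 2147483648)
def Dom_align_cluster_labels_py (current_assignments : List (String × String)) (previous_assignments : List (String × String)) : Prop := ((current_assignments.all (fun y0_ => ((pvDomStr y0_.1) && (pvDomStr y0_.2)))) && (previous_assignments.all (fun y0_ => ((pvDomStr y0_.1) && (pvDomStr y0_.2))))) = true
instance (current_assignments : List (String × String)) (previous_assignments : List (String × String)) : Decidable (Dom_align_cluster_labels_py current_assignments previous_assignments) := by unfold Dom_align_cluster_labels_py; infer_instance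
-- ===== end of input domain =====

-- B replaces A's quadratic pairwise member-set intersections by one counting pass over the
-- states (a (current,previous)-pair counter); everything downstream (greedy matching on the
-- descending-sorted scores, fresh-label assignment) is behaviourally identical.

-- ===== SHARED HELPERS (the greedy/relabel tail is literally the same Python in A and in B) =====

-- Python compares the (overlap, cur, prev) triples lexicographically; toLex on nested pairs is
-- exactly that order (Int then String then String, strings by code point).
def tripleKey (t : Int × String × String) : Lex (Int × Lex (String × String)) :=
  toLex (t.1, toLex (t.2.1, t.2.2))

-- f"cluster_{n}"  (n is a nonnegative int in both programs; Int.toStr is Python's str())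
def clusterLabel (n : Int) : String := "cluster_" ++ PySem.Int.toStr n

-- the 'while f"cluster_{i}" in taken: i += 1' loop; fuel = |taken|+1 suffices because the
-- |taken|+1 candidate labels are distinct, so one of them is free (same iterations as Python).
def findFreeAux : Nat → PySem.Set String → Int → Int
  | 0, _, n => n
  | fuel + 1, taken, n =>
    if PySem.Set.contains taken (clusterLabel n) then findFreeAux fuel taken (n + 1) else n

def findFree (taken : PySem.Set String) (n : Int) : Int :=
  findFreeAux (taken.length + 1) taken n

-- the fresh-label loop over the sorted unmatched current clusters (identical in A and B)
def relabelStep (st : PySem.Dict String String × PySem.Set String × Int) (c : String) :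
    PySem.Dict String String × PySem.Set String × Int :=
  if st.1.contains c then st
  else
    let i := findFree st.2.1 st.2.2
    (st.1.insert c (clusterLabel i), PySem.Set.add st.2.1 (clusterLabel i), i)

def relabelLoop (clusters : List String) (remap : PySem.Dict String String)
    (taken : PySem.Set String) : PySem.Dict String String :=
  (clusters.foldl relabelStep (remap, taken, 0)).1

-- ===== PORT A =====
-- str(x) on a str is the identity, so the comprehensions' str() calls are dropped.
def align_cluster_labels_py (current_assignments : List (String × String)) (previous_assignments : List (String × String)) : List (String × String) :=
  let cur := PySem.Dict.ofList current_assignments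
  let prev := PySem.Dict.ofList previous_assignments
  if cur.items.isEmpty || prev.items.isEmpty then cur.items
  else
    let curM : PySem.Dict String (PySem.Set String) :=
      cur.items.foldl (fun d q => d.modify q.2 PySem.Set.empty (fun st => PySem.Set.add st q.1)) PySem.Dict.empty
    let prevM : PySem.Dict String (PySem.Set String) :=
      prev.items.foldl (fun d q => d.modify q.2 PySem.Set.empty (fun st => PySem.Set.add st q.1)) PySem.Dict.empty
    let scores : List (Int × String × String) :=
      curM.items.foldl (fun acc cq =>
        prevM.items.foldl (fun acc2 pq =>
          if 0 < PySem.Set.len (PySem.Set.inter cq.2 pq.2) then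
            acc2 ++ [(PySem.Set.len (PySem.Set.inter cq.2 pq.2), cq.1, pq.1)]
          else acc2) acc) []
    let remap0 :=
      ((PySem.List.sorted scores tripleKey true).foldl (fun st t =>
          if st.2.1.contains t.2.1 || PySem.Set.contains st.2.2 t.2.2 then st
          else (st.1.insert t.2.1 t.2.2, PySem.Set.add st.2.1 t.2.1, PySem.Set.add st.2.2 t.2.2))
        ((PySem.Dict.empty : PySem.Dict String String), (PySem.Set.empty : PySem.Set String),
          (PySem.Set.empty : PySem.Set String))).1
    let remap := relabelLoop (PySem.List.sorted curM.keys (fun k => k) false) remap0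
      (PySem.Set.ofList prevM.keys)
    cur.items.map (fun q => (q.1, remap.getD q.2 q.2))

-- ===== PORT B =====
def align_cluster_labels_py_alt (current_assignments : List (String × String)) (previous_assignments : List (String × String)) : List (String × String) :=
  let cur := PySem.Dict.ofList current_assignments
  let prev := PySem.Dict.ofList previous_assignments
  if cur.items.isEmpty || prev.items.isEmpty then cur.items
  else
    -- one pass over the states: the get-or-0-and-increment loop is collections-Counter of the
    -- (cur_cluster, prev_cluster) pairs of states present in both dicts
    let pairs : List (String × String) :=
      cur.items.filterMap (fun q => (prev.get? q.1).map (fun pc => (q.2, pc)))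
    let scores : List (Int × String × String) :=
      (PySem.Dict.counter pairs).items.map (fun kq => (kq.2, kq.1.1, kq.1.2))
    let remap0 :=
      ((PySem.List.sorted scores tripleKey true).foldl (fun st t =>
          if st.1.contains t.2.1 || PySem.Set.contains st.2 t.2.2 then st
          else (st.1.insert t.2.1 t.2.2, PySem.Set.add st.2 t.2.2))
        ((PySem.Dict.empty : PySem.Dict String String), (PySem.Set.empty : PySem.Set String))).1
    let remap := relabelLoop
      (PySem.List.sorted (PySem.List.dedup (cur.items.map (fun q => q.2))) (fun k => k) false)
      remap0 (PySem.Set.ofList (prev.items.map (fun q => q.2)))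
    cur.items.map (fun q => (q.1, remap.getD q.2 q.2))

-- ===== PRECONDITION & SPEC =====
def Spec_align_cluster_labels_py (current_assignments : List (String × String)) (previous_assignments : List (String × String)) (out : List (String × String)) : Prop := out = align_cluster_labels_py_alt current_assignments previous_assignments
instance (current_assignments : List (String × String)) (previous_assignments : List (String × String)) (out : List (String × String)) : Decidable (Spec_align_cluster_labels_py current_assignments previous_assignments out) := by unfold Spec_align_cluster_labels_py; infer_instance

-- ===== CLAIM (what is proved, stated in full; the proofs are below) =====
def Claim_equal_align_cluster_labels_py : Prop := ∀ (current_assignments : List (String × String)) (previous_assignments : List (String × String)), Dom_align_cluster_labels_py current_assignments previous_assignments → Spec_align_cluster_labels_py current_assignments previous_assignments (align_cluster_labels_py current_assignments previous_assignments)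


-- ===== LEMMAS AND PROOFS =====

-- abbreviations for the two builds (proof-side only)
def memF (xs : List (String × String)) : PySem.Dict String (PySem.Set String) :=
  xs.foldl (fun d q => d.modify q.2 PySem.Set.empty (fun st => PySem.Set.add st q.1)) PySem.Dict.empty

-- number of states assigned to cluster c now and to cluster p before
theorem memF_keys (xs : List (String × String)) :
    (memF xs).keys = PySem.Set.ofList (xs.map Prod.snd) := by
  unfold memF
  rw [PySem.Dict.keys_foldl_modify_key xs (fun q => q.2) PySem.Set.empty
    (fun _ q => fun st => PySem.Set.add st q.1) PySem.Dict.empty]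
  rw [PySem.Set.ofList_eq_foldl]
  rfl

def ovN (cu : List (String × String)) (D : PySem.Dict String String) (c p : String) : Nat :=
  (cu.filter (fun q => q.2 == c && (D.get? q.1 == some p))).length

theorem set_contains_add (s : PySem.Set String) (a x : String) :
    PySem.Set.contains (PySem.Set.add s a) x = (x == a || PySem.Set.contains s x) := by
  show List.contains (PySem.Set.add s a) x = (x == a || List.contains s x)
  simp only [List.contains_eq_mem, PySem.Set.mem_add]
  by_cases hx : x = a <;> by_cases hs : x ∈ s <;> simp [hx, hs]

theorem memF_getD (xs : List (String × String)) (d : PySem.Dict String (PySem.Set String))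
    (c : String) :
    (xs.foldl (fun d q => d.modify q.2 PySem.Set.empty (fun st => PySem.Set.add st q.1)) d).getD c PySem.Set.empty
      = PySem.Set.update (d.getD c PySem.Set.empty) ((xs.filter (fun q => q.2 == c)).map Prod.fst) := by
  induction xs generalizing d with
  | nil => rfl
  | cons q t ih =>
    simp only [List.foldl_cons, List.filter_cons]
    by_cases h : q.2 = c
    · simp only [h, beq_self_eq_true, if_pos, List.map_cons]
      rw [ih, PySem.Dict.getD_modify, if_pos rfl]
      rfl
    · have hb : (q.2 == c) = false := by simp [h]
      rw [ih, PySem.Dict.getD_modify, if_neg (fun hc : c = q.2 => h hc.symm)]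
      simp [hb]

theorem memF_items (xs : List (String × String)) :
    (memF xs).items = (PySem.Set.ofList (xs.map Prod.snd)).map
      (fun c => (c, PySem.Set.update PySem.Set.empty ((xs.filter (fun q => q.2 == c)).map Prod.fst))) := by
  have hnd : (memF xs).keys.Nodup := by rw [memF_keys]; exact PySem.Set.nodup_ofList _
  rw [PySem.Dict.items_eq_map_keys _ hnd PySem.Set.empty, memF_keys]
  refine List.map_congr_left fun c _ => ?_
  exact congrArg (Prod.mk c) (memF_getD xs PySem.Dict.empty c)

theorem counter_items (xs : List (String × String)) :
    (PySem.Dict.counter xs).items = (PySem.Set.ofList xs).map (fun k => (k, (xs.count k : Int))) := by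
  have hk : (PySem.Dict.counter xs).keys = PySem.Set.ofList xs := by
    rw [PySem.Dict.counter_eq_foldl]
    rw [PySem.Dict.keys_foldl_modify_key xs (fun q => q) 0 (fun _ _ => fun v => v + 1)
      PySem.Dict.empty]
    rw [PySem.Set.ofList_eq_foldl, List.map_id']
    rfl
  have hnd : (PySem.Dict.counter xs).keys.Nodup := by rw [hk]; exact PySem.Set.nodup_ofList _
  rw [PySem.Dict.items_eq_map_keys _ hnd 0, hk]
  refine List.map_congr_left fun k _ => ?_
  exact congrArg (Prod.mk k) (PySem.Dict.getD_counter xs k)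

theorem update_empty (l : List String) : PySem.Set.update PySem.Set.empty l = PySem.Set.ofList l := by
  rw [PySem.Set.ofList_eq_foldl]; rfl

-- the members' state set, as a plain list, when the state keys are distinct
theorem states_list (xs : List (String × String)) (h : (xs.map Prod.fst).Nodup) (c : String) :
    PySem.Set.update PySem.Set.empty ((xs.filter (fun q => q.2 == c)).map Prod.fst)
      = (xs.filter (fun q => q.2 == c)).map Prod.fst := by
  rw [update_empty]
  exact PySem.Set.ofList_eq_self_of_nodup _
    (List.Nodup.sublist (List.Sublist.map Prod.fst List.filter_sublist) h)

-- |Sc ∩ Sp| is the number of states with current cluster c and previous cluster p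
theorem inter_len (cu : List (String × String)) (D : PySem.Dict String String)
    (hcu : (cu.map Prod.fst).Nodup) (hD : (D.items.map Prod.fst).Nodup) (c p : String) :
    PySem.Set.len (PySem.Set.inter
        (PySem.Set.update PySem.Set.empty ((cu.filter (fun q => q.2 == c)).map Prod.fst))
        (PySem.Set.update PySem.Set.empty ((D.items.filter (fun q => q.2 == p)).map Prod.fst)))
      = (ovN cu D c p : Int) := by
  rw [states_list cu hcu c, states_list D.items hD p]
  have hint : ∀ s t : PySem.Set String, PySem.Set.inter s t = s.filter t.contains :=
    fun _ _ => rfl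
  have hlen : ∀ s : PySem.Set String, PySem.Set.len s = (s.length : Int) := fun _ => rfl
  rw [hint, hlen]
  have hmemP : ∀ s : String,
      PySem.Set.contains ((D.items.filter (fun q => q.2 == p)).map Prod.fst) s
        = (D.get? s == some p) := by
    intro s
    show List.contains _ s = _
    rw [List.contains_eq_mem]
    by_cases hm : D.get? s = some p
    · have hmem : (s, p) ∈ D.items := (PySem.Dict.get?_eq_some_iff_mem_items D s p hD).1 hm
      simp only [hm, beq_self_eq_true, decide_eq_true_eq]
      exact List.mem_map.2 ⟨(s, p), by simp [List.mem_filter, hmem], rfl⟩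
    · have : s ∉ (D.items.filter (fun q => q.2 == p)).map Prod.fst := by
        intro hs
        obtain ⟨q, hq, hq1⟩ := List.mem_map.1 hs
        obtain ⟨hqm, hq2⟩ := List.mem_filter.1 hq
        apply hm
        rw [← hq1]
        exact (PySem.Dict.get?_eq_some_iff_mem_items D q.1 p hD).2 (by
          have : q = (q.1, p) := by
            rw [Prod.ext_iff]
            exact ⟨rfl, by simpa using hq2⟩
          rwa [this] at hqm)
      simp [this, hm]
  rw [List.filter_congr (fun s _ => hmemP s), List.filter_map, List.filter_filter,
    List.length_map]
  norm_cast
  unfold ovN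
  congr 1
  refine List.filter_congr fun q _ => ?_
  simp only [Function.comp]
  exact Bool.and_comm _ _

def scoresAOf (cu : List (String × String)) (M : PySem.Dict String (PySem.Set String)) :
    List (Int × String × String) :=
  (memF cu).items.foldl (fun acc cq =>
    M.items.foldl (fun acc2 pq =>
      if 0 < PySem.Set.len (PySem.Set.inter cq.2 pq.2) then
        acc2 ++ [(PySem.Set.len (PySem.Set.inter cq.2 pq.2), cq.1, pq.1)]
      else acc2) acc) []

theorem foldl_append_ifP {α β : Type} (p : α → Prop) [DecidablePred p] (f : α → β)
    (l : List α) (acc : List β) :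
    l.foldl (fun acc x => if p x then acc ++ [f x] else acc) acc
      = acc ++ (l.filter (fun x => decide (p x))).map f := by
  induction l generalizing acc with
  | nil => simp
  | cons a t ih =>
    simp only [List.foldl_cons, List.filter_cons]
    by_cases h : p a <;> simp [h, ih]

theorem scoresA_flatMap (cu : List (String × String)) (M : PySem.Dict String (PySem.Set String)) :
    scoresAOf cu M = (memF cu).items.flatMap (fun cq =>
      (M.items.filter (fun pq => 0 < PySem.Set.len (PySem.Set.inter cq.2 pq.2))).map
        (fun pq => (PySem.Set.len (PySem.Set.inter cq.2 pq.2), cq.1, pq.1))) := by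
  unfold scoresAOf
  simp only [foldl_append_ifP, PySem.List.foldl_append_eq_flatMap, List.nil_append]

theorem mem_scoresA (cu pv : List (String × String)) (D : PySem.Dict String String)
    (hcu : (cu.map Prod.fst).Nodup) (hpv : (pv.map Prod.fst).Nodup) (hD : D.items = pv)
    (t : Int × String × String) :
    t ∈ scoresAOf cu (memF pv) ↔
      (0 < ovN cu D t.2.1 t.2.2 ∧ t.1 = (ovN cu D t.2.1 t.2.2 : Int)) := by
  have hD' : (D.items.map Prod.fst).Nodup := by rw [hD]; exact hpv
  have hlen : ∀ c0 p0 : String, PySem.Set.len (PySem.Set.inter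
      (PySem.Set.update PySem.Set.empty ((cu.filter (fun q => q.2 == c0)).map Prod.fst))
      (PySem.Set.update PySem.Set.empty ((pv.filter (fun q => q.2 == p0)).map Prod.fst)))
      = (ovN cu D c0 p0 : Int) := by
    intro c0 p0
    rw [← hD]
    exact inter_len cu D hcu hD' c0 p0
  rw [scoresA_flatMap, memF_items cu, memF_items pv, List.flatMap_map]
  constructor
  · intro ht
    obtain ⟨c0, hc0, ht2⟩ := List.mem_flatMap.1 ht
    obtain ⟨pq, hpq, rfl⟩ := List.mem_map.1 ht2
    obtain ⟨hpqm, hpos⟩ := List.mem_filter.1 hpq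
    obtain ⟨p0, hp0, rfl⟩ := List.mem_map.1 hpqm
    simp only [decide_eq_true_eq] at hpos
    rw [hlen c0 p0] at hpos ⊢
    exact ⟨by exact_mod_cast hpos, rfl⟩
  · rintro ⟨hpos, ht1⟩
    obtain ⟨q, hq, hqpred⟩ : ∃ q ∈ cu, (q.2 == t.2.1 && (D.get? q.1 == some t.2.2)) = true := by
      have hne : 0 < (cu.filter (fun q => q.2 == t.2.1 && (D.get? q.1 == some t.2.2))).length := by
        unfold ovN at hpos; exact hpos
      obtain ⟨q, hqf⟩ := List.exists_mem_of_length_pos hne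
      exact ⟨q, (List.mem_filter.1 hqf).1, (List.mem_filter.1 hqf).2⟩
    have hq2 : q.2 = t.2.1 ∧ D.get? q.1 = some t.2.2 := by simpa using hqpred
    apply List.mem_flatMap.2
    refine ⟨t.2.1, (PySem.Set.mem_ofList _ _).2 (List.mem_map.2 ⟨q, hq, hq2.1⟩), ?_⟩
    apply List.mem_map.2
    refine ⟨(t.2.2, PySem.Set.update PySem.Set.empty
      ((pv.filter (fun q => q.2 == t.2.2)).map Prod.fst)), ?_, ?_⟩
    · apply List.mem_filter.2
      constructor
      · apply List.mem_map.2
        have hmemp : (q.1, t.2.2) ∈ pv := by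
          rw [← hD]
          exact (PySem.Dict.get?_eq_some_iff_mem_items D q.1 t.2.2 hD').1 hq2.2
        exact ⟨t.2.2, (PySem.Set.mem_ofList _ _).2 (List.mem_map.2 ⟨(q.1, t.2.2), hmemp, rfl⟩),
          rfl⟩
      · simp only [hlen t.2.1 t.2.2, decide_eq_true_eq]
        exact_mod_cast hpos
    · rw [hlen t.2.1 t.2.2, ← ht1]

theorem nodup_scoresA (cu pv : List (String × String)) :
    (scoresAOf cu (memF pv)).Nodup := by
  rw [scoresA_flatMap, memF_items cu, memF_items pv, List.flatMap_map, List.nodup_flatMap]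
  constructor
  · intro c0 _
    apply List.Nodup.map_on
    · intro x hx y hy hxy
      obtain ⟨px, hpx, rfl⟩ := List.mem_map.1 (List.mem_filter.1 hx).1
      obtain ⟨py, hpy, rfl⟩ := List.mem_map.1 (List.mem_filter.1 hy).1
      have hp : px = py := by simpa using congrArg (fun z => z.2.2) hxy
      rw [hp]
    · exact ((PySem.Set.nodup_ofList _).map
        (fun a b hab => by simpa using congrArg Prod.fst hab)).filter _
  · refine List.Pairwise.imp ?_ (PySem.Set.nodup_ofList (cu.map Prod.snd))
    intro c0 c1 hne t ht0 ht1
    obtain ⟨pq0, _, heq0⟩ := List.mem_map.1 ht0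
    obtain ⟨pq1, _, heq1⟩ := List.mem_map.1 ht1
    apply hne
    have h0 : t.2.1 = c0 := by rw [← heq0]
    have h1 : t.2.1 = c1 := by rw [← heq1]
    rw [← h0, h1]

def scoresBOf (cu : List (String × String)) (D : PySem.Dict String String) :
    List (Int × String × String) :=
  (PySem.Dict.counter (cu.filterMap (fun q => (D.get? q.1).map (fun pc => (q.2, pc))))).items.map
    (fun kq => (kq.2, kq.1.1, kq.1.2))

theorem count_pairs (cu : List (String × String)) (D : PySem.Dict String String) (c p : String) :
    (cu.filterMap (fun q => (D.get? q.1).map (fun pc => (q.2, pc)))).count (c, p) = ovN cu D c p := by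
  unfold ovN
  rw [List.count_filterMap, ← List.countP_eq_length_filter]
  refine List.countP_congr fun q _ => ?_
  cases hg : D.get? q.1 with
  | none => simp
  | some v => simp [Prod.ext_iff]

theorem mem_scoresB (cu : List (String × String)) (D : PySem.Dict String String)
    (t : Int × String × String) :
    t ∈ scoresBOf cu D ↔
      (0 < ovN cu D t.2.1 t.2.2 ∧ t.1 = (ovN cu D t.2.1 t.2.2 : Int)) := by
  unfold scoresBOf
  rw [counter_items, List.map_map]
  constructor
  · intro ht
    obtain ⟨k, hk, rfl⟩ := List.mem_map.1 ht
    have hk' := (PySem.Set.mem_ofList _ _).1 hk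
    simp only [Function.comp]
    constructor
    · rw [← count_pairs cu D k.1 k.2]
      exact List.count_pos_iff.2 hk'
    · rw [count_pairs cu D k.1 k.2]
  · rintro ⟨hpos, ht1⟩
    apply List.mem_map.2
    refine ⟨(t.2.1, t.2.2), (PySem.Set.mem_ofList _ _).2 ?_, ?_⟩
    · exact List.count_pos_iff.1 (by rw [count_pairs]; exact hpos)
    · simp only [Function.comp]
      rw [count_pairs, ← ht1]

theorem nodup_scoresB (cu : List (String × String)) (D : PySem.Dict String String) :
    (scoresBOf cu D).Nodup := by
  unfold scoresBOf
  rw [counter_items, List.map_map]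
  apply List.Nodup.map ?_ (PySem.Set.nodup_ofList _)
  intro a b h
  simp only [Function.comp, Prod.mk.injEq] at h
  exact Prod.ext h.2.1 h.2.2

theorem tripleKey_inj : Function.Injective tripleKey := by
  intro a b h
  simp only [tripleKey, toLex_inj, Prod.mk.injEq] at h
  obtain ⟨h1, h2, h3⟩ := h
  exact Prod.ext h1 (Prod.ext h2 h3)

theorem sorted_scores_eq (cu pv : List (String × String)) (D : PySem.Dict String String)
    (hcu : (cu.map Prod.fst).Nodup) (hpv : (pv.map Prod.fst).Nodup) (hD : D.items = pv) :
    PySem.List.sorted (scoresAOf cu (memF pv)) tripleKey true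
      = PySem.List.sorted (scoresBOf cu D) tripleKey true := by
  have hperm : (scoresBOf cu D).Perm (scoresAOf cu (memF pv)) := by
    rw [List.perm_ext_iff_of_nodup (nodup_scoresB cu D) (nodup_scoresA cu pv)]
    intro t
    rw [mem_scoresB cu D t, mem_scoresA cu pv D hcu hpv hD t]
  apply PySem.List.sorted_rev_eq_of_perm_of_pairwise_gt
  · exact (PySem.List.sorted_perm _ _ _).trans hperm
  · have h1 := PySem.List.sorted_pairwise_rev (scoresBOf cu D) tripleKey
    have hnd : (PySem.List.sorted (scoresBOf cu D) tripleKey true).Nodup :=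
      ((PySem.List.sorted_perm _ _ _).nodup_iff).2 (nodup_scoresB cu D)
    refine (h1.and hnd).imp ?_
    rintro a b ⟨hle, hab⟩
    exact lt_of_le_of_ne hle fun hk => hab (tripleKey_inj hk.symm)

theorem greedy_eq (l : List (Int × String × String)) :
    ∀ (r : PySem.Dict String String) (uc up : PySem.Set String),
      (∀ x, PySem.Set.contains uc x = r.contains x) →
      ((l.foldl (fun st t =>
          if st.2.1.contains t.2.1 || PySem.Set.contains st.2.2 t.2.2 then st
          else (st.1.insert t.2.1 t.2.2, PySem.Set.add st.2.1 t.2.1, PySem.Set.add st.2.2 t.2.2))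
          (r, uc, up)).1
        = (l.foldl (fun st t =>
          if st.1.contains t.2.1 || PySem.Set.contains st.2 t.2.2 then st
          else (st.1.insert t.2.1 t.2.2, PySem.Set.add st.2 t.2.2)) (r, up)).1) := by
  induction l with
  | nil => intro r uc up h; rfl
  | cons a t ih =>
    intro r uc up h
    simp only [List.foldl_cons]
    rw [show PySem.Set.contains uc a.2.1 = r.contains a.2.1 from h a.2.1]
    by_cases hc : (r.contains a.2.1 || PySem.Set.contains up a.2.2) = true
    · rw [if_pos hc, if_pos hc]
      exact ih r uc up h
    · rw [if_neg hc, if_neg hc]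
      refine ih _ _ _ fun x => ?_
      rw [set_contains_add, PySem.Dict.contains_insert, h x]

theorem main_eq (c p : List (String × String)) :
    align_cluster_labels_py c p = align_cluster_labels_py_alt c p := by
  unfold align_cluster_labels_py align_cluster_labels_py_alt
  by_cases h : ((PySem.Dict.ofList c).items.isEmpty
      || (PySem.Dict.ofList p).items.isEmpty) = true
  · simp only [if_pos h]
  · simp only [if_neg h]
    have hcun : (((PySem.Dict.ofList c).items).map Prod.fst).Nodup :=
      PySem.Dict.nodup_keys_ofList c
    have hpvn : (((PySem.Dict.ofList p).items).map Prod.fst).Nodup :=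
      PySem.Dict.nodup_keys_ofList p
    have h1 : PySem.List.sorted (scoresAOf ((PySem.Dict.ofList c).items)
          (memF ((PySem.Dict.ofList p).items))) tripleKey true
        = PySem.List.sorted (scoresBOf ((PySem.Dict.ofList c).items)
          (PySem.Dict.ofList p)) tripleKey true :=
      sorted_scores_eq _ _ _ hcun hpvn rfl
    have h2 : ((PySem.List.sorted (scoresAOf ((PySem.Dict.ofList c).items)
            (memF ((PySem.Dict.ofList p).items))) tripleKey true).foldl (fun st t =>
          if st.2.1.contains t.2.1 || PySem.Set.contains st.2.2 t.2.2 then st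
          else (st.1.insert t.2.1 t.2.2, PySem.Set.add st.2.1 t.2.1, PySem.Set.add st.2.2 t.2.2))
          ((PySem.Dict.empty : PySem.Dict String String), (PySem.Set.empty : PySem.Set String),
            (PySem.Set.empty : PySem.Set String))).1
        = ((PySem.List.sorted (scoresBOf ((PySem.Dict.ofList c).items)
            (PySem.Dict.ofList p)) tripleKey true).foldl (fun st t =>
          if st.1.contains t.2.1 || PySem.Set.contains st.2 t.2.2 then st
          else (st.1.insert t.2.1 t.2.2, PySem.Set.add st.2 t.2.2))
          ((PySem.Dict.empty : PySem.Dict String String),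
            (PySem.Set.empty : PySem.Set String))).1 := by
      rw [h1]
      exact greedy_eq _ PySem.Dict.empty PySem.Set.empty PySem.Set.empty (fun x => rfl)
    have h3 : (memF ((PySem.Dict.ofList c).items)).keys
        = PySem.List.dedup (((PySem.Dict.ofList c).items).map (fun q => q.2)) := by
      rw [memF_keys]
      exact (PySem.List.dedup_eq_ofList _).symm
    have h4 : PySem.Set.ofList (memF ((PySem.Dict.ofList p).items)).keys
        = PySem.Set.ofList (((PySem.Dict.ofList p).items).map (fun q => q.2)) := by
      rw [memF_keys]
      exact PySem.Set.ofList_eq_self_of_nodup _ (PySem.Set.nodup_ofList _)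
    have eqn : ((PySem.Dict.ofList c).items).map (fun q => (q.1,
          (relabelLoop (PySem.List.sorted (memF ((PySem.Dict.ofList c).items)).keys
              (fun k => k) false)
            ((PySem.List.sorted (scoresAOf ((PySem.Dict.ofList c).items)
                (memF ((PySem.Dict.ofList p).items))) tripleKey true).foldl (fun st t =>
              if st.2.1.contains t.2.1 || PySem.Set.contains st.2.2 t.2.2 then st
              else (st.1.insert t.2.1 t.2.2, PySem.Set.add st.2.1 t.2.1,
                PySem.Set.add st.2.2 t.2.2))
              ((PySem.Dict.empty : PySem.Dict String String),
                (PySem.Set.empty : PySem.Set String),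
                (PySem.Set.empty : PySem.Set String))).1
            (PySem.Set.ofList (memF ((PySem.Dict.ofList p).items)).keys)).getD q.2 q.2))
        = ((PySem.Dict.ofList c).items).map (fun q => (q.1,
          (relabelLoop (PySem.List.sorted
              (PySem.List.dedup (((PySem.Dict.ofList c).items).map (fun q => q.2)))
              (fun k => k) false)
            ((PySem.List.sorted (scoresBOf ((PySem.Dict.ofList c).items)
                (PySem.Dict.ofList p)) tripleKey true).foldl (fun st t =>
              if st.1.contains t.2.1 || PySem.Set.contains st.2 t.2.2 then st
              else (st.1.insert t.2.1 t.2.2, PySem.Set.add st.2 t.2.2))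
              ((PySem.Dict.empty : PySem.Dict String String),
                (PySem.Set.empty : PySem.Set String))).1
            (PySem.Set.ofList (((PySem.Dict.ofList p).items).map (fun q => q.2)))).getD q.2 q.2)) := by
      rw [h2, h3, h4]
    exact eqn

-- ===== VERDICT (by name: the statement is the Claim_ definition above) =====
theorem align_cluster_labels_py_spec : Claim_equal_align_cluster_labels_py := by
  intro c p _
  show _ = _
  exact main_eq c p
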